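-- pv_equiv track=rewrite | github.com/lio-snp/llm_rl_trading_finsaber | src/pipeline/regime_specialist.py | apply_regime_persistence_filter
-- ===== SOURCE A (Python) =====
-- from typing import Iterable
--
-- def apply_regime_persistence_filter(raw_labels: Iterable[str], persistence_days: int = 5) -> list[str]:
--     final_labels: list[str] = []
--     prev_raw = ""
--     streak = 0
--     for label in raw_labels:
--         if label == prev_raw:
--             streak += 1
--         else:
--             prev_raw = label
--             streak = 1
--
--         prev_final = final_labels[-1] if final_labels else "sideways"
--         if label == "sideways":
--             final_labels.append("sideways")
--         elif prev_final == label: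
--             final_labels.append(label)
--         elif streak >= int(max(1, persistence_days)):
--             final_labels.append(label)
--         else:
--             final_labels.append("sideways")
--     return final_labels
-- ===== SOURCE B (Python) =====
-- from itertools import groupby
--
-- def apply_regime_persistence_filter(raw_labels, persistence_days=5):
--     T = int(max(1, persistence_days))
--     out = []
--     for label, grp in groupby(raw_labels):
--         L = sum(1 for _ in grp)
--         if label == "sideways":
--             out.extend(["sideways"] * L)
--         else:
--             k = min(T - 1, L)
--             out.extend(["sideways"] * k + [label] * (L - k))
--     return out
-- ===== Notes on version B (the rewrite author's own statement) =====
-- stated objective: simpler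
-- what changed: Replaces the element-by-element loop with streak/prev_final state by a run-length (groupby) decomposition: each maximal run of equal labels is emitted in closed form as min(T-1,L) 'sideways' followed by L-min(T-1,L) copies of the label ('sideways' runs pass through unchanged).
import Mathlib
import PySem

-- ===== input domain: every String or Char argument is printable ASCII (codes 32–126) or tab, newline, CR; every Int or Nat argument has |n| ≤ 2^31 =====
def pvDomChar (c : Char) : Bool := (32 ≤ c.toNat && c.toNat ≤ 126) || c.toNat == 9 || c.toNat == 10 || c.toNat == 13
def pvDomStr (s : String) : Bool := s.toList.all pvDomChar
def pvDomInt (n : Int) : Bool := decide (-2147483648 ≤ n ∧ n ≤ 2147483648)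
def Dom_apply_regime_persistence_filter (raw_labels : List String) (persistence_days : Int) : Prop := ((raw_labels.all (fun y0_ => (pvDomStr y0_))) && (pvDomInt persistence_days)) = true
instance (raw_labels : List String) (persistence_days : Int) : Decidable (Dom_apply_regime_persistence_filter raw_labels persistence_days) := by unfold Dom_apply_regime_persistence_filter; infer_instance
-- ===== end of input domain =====

-- B replaces A's element-by-element streak/prev_final bookkeeping by a run-length
-- (groupby) decomposition emitting each maximal run in closed form; objective: simpler.

-- ===== PORT A =====
-- one iteration of A's for-loop over the state (final_labels, prev_raw, streak)
def pvStepA (persistence_days : Int) (st : List String × String × Int) (label : String) : List String × String × Int :=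
  let ps := if label == st.2.1 then (st.2.1, st.2.2 + 1) else (label, (1 : Int))
  let prev_final := (st.1.getLast?).getD "sideways"   -- final_labels[-1] if final_labels else "sideways"
  let out :=
    if label == "sideways" then "sideways"
    else if prev_final == label then label
    else if ps.2 ≥ max 1 persistence_days then label  -- int(max(1, persistence_days)) is max 1 _ on Int
    else "sideways"
  (st.1 ++ [out], ps)

def apply_regime_persistence_filter (raw_labels : List String) (persistence_days : Int) : List String :=
  (raw_labels.foldl (pvStepA persistence_days) ([], "", 0)).1

-- ===== PORT B =====
-- closed-form output for one maximal run of L equal labels x (threshold T):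
-- k = min(T-1, L) copies of "sideways", then L-k copies of x
def pvSegB (x : String) (L : Nat) (T : Int) : List String :=
  if x == "sideways" then List.replicate L "sideways"
  else List.replicate (min (T - 1) (L : Int)).toNat "sideways"
    ++ List.replicate (L - (min (T - 1) (L : Int)).toNat) x

-- itertools.groupby: peel off maximal runs of equal labels
def pvGoB (T : Int) : List String → List String
  | [] => []
  | x :: rest =>
    pvSegB x ((rest.takeWhile (fun y => y == x)).length + 1) T
      ++ pvGoB T (rest.dropWhile (fun y => y == x))
termination_by l => l.length
decreasing_by
  simpa using Nat.lt_succ_of_le (List.length_dropWhile_le (fun y => y == x) rest)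

def apply_regime_persistence_filter_alt (raw_labels : List String) (persistence_days : Int) : List String :=
  pvGoB (max 1 persistence_days) raw_labels

-- ===== PRECONDITION & SPEC =====
def Spec_apply_regime_persistence_filter (raw_labels : List String) (persistence_days : Int) (out : List String) : Prop := out = apply_regime_persistence_filter_alt raw_labels persistence_days
instance (raw_labels : List String) (persistence_days : Int) (out : List String) : Decidable (Spec_apply_regime_persistence_filter raw_labels persistence_days out) := by unfold Spec_apply_regime_persistence_filter; infer_instance

-- ===== CLAIM (what is proved, stated in full; the proofs are below) =====
def Claim_equal_apply_regime_persistence_filter : Prop := ∀ (raw_labels : List String) (persistence_days : Int), Dom_apply_regime_persistence_filter raw_labels persistence_days → Spec_apply_regime_persistence_filter raw_labels persistence_days (apply_regime_persistence_filter raw_labels persistence_days)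

-- ===== LEMMAS AND PROOFS =====

theorem pv_getLast?_replicate_succ {α : Type} (k : Nat) (u : α) :
    (List.replicate (k + 1) u).getLast? = some u := by
  rw [List.replicate_succ', List.getLast?_concat]

theorem pv_last_append_rep {α : Type} (fs : List α) (k : Nat) (u : α) (hk : k ≠ 0) :
    (fs ++ List.replicate k u).getLast? = some u := by
  obtain ⟨j, rfl⟩ : ∃ j, k = j + 1 := ⟨k - 1, by omega⟩
  rw [List.replicate_succ', ← List.append_assoc, List.getLast?_concat]

theorem pv_seg_last (y : String) (L : Nat) (T : Int) (hL : L ≠ 0) :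
    (pvSegB y L T).getLast? = some "sideways" ∨ (pvSegB y L T).getLast? = some y := by
  rw [pvSegB]
  split
  · left
    obtain ⟨j, rfl⟩ : ∃ j, L = j + 1 := ⟨L - 1, by omega⟩
    exact pv_getLast?_replicate_succ j _
  · by_cases h : L - (min (T - 1) (L : Int)).toNat = 0
    · left
      have hkL : (min (T - 1) (L : Int)).toNat ≤ L := by omega
      rw [h]
      simp only [List.replicate_zero, List.append_nil]
      simpa using pv_last_append_rep ([] : List String) _ "sideways" (by omega)
    · exact Or.inr (pv_last_append_rep _ _ _ h)

-- sideways run: every element appends "sideways"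
theorem pv_run_sideways (p : Int) :
    ∀ (n : Nat) (fs : List String) (s : Int),
    List.foldl (pvStepA p) (fs, "sideways", s) (List.replicate n "sideways")
      = (fs ++ List.replicate n "sideways", "sideways", s + n) := by
  intro n
  induction n with
  | zero => intro fs s; simp
  | succ m ih =>
    intro fs s
    rw [List.replicate_succ, List.foldl_cons]
    have hstep : pvStepA p (fs, "sideways", s) "sideways" = (fs ++ ["sideways"], "sideways", s + 1) := by
      simp [pvStepA]
    rw [hstep, ih]
    refine Prod.ext ?_ (Prod.ext rfl ?_)
    · simp [List.append_assoc]
    · push_cast; ring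

-- absorbed run: the last final label equals x, every element appends x
theorem pv_run_absorbed (p : Int) (x : String) (hx : x ≠ "sideways") :
    ∀ (n : Nat) (fs : List String) (s : Int), fs.getLast? = some x →
    List.foldl (pvStepA p) (fs, x, s) (List.replicate n x)
      = (fs ++ List.replicate n x, x, s + n) := by
  intro n
  induction n with
  | zero => intro fs s _; simp
  | succ m ih =>
    intro fs s hlast
    rw [List.replicate_succ, List.foldl_cons]
    have hstep : pvStepA p (fs, x, s) x = (fs ++ [x], x, s + 1) := by
      simp [pvStepA, hlast, hx]
    rw [hstep, ih _ _ (by rw [List.getLast?_concat])]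
    refine Prod.ext ?_ (Prod.ext rfl ?_)
    · simp [List.append_assoc]
    · push_cast; ring

-- pending run: the last final label differs from x; sideways until the streak reaches the threshold
theorem pv_run_pending (p : Int) (x : String) (hx : x ≠ "sideways") :
    ∀ (n : Nat) (fs : List String) (s : Int), (fs.getLast?).getD "sideways" ≠ x →
    List.foldl (pvStepA p) (fs, x, s) (List.replicate n x)
      = (fs ++ List.replicate (min (max 1 p - 1 - s) (n : Int)).toNat "sideways"
            ++ List.replicate (n - (min (max 1 p - 1 - s) (n : Int)).toNat) x, x, s + n) := by
  intro n
  induction n with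
  | zero => intro fs s _; simp
  | succ m ih =>
    intro fs s hlast
    rw [List.replicate_succ, List.foldl_cons]
    by_cases hT : s + 1 ≥ max 1 p
    · have hstep : pvStepA p (fs, x, s) x = (fs ++ [x], x, s + 1) := by
        simp [pvStepA, hx, hT, hlast]
      rw [hstep, pv_run_absorbed p x hx m _ _ (by rw [List.getLast?_concat])]
      have hk : (min (max 1 p - 1 - s) ((m + 1 : Nat) : Int)).toNat = 0 := by omega
      rw [hk]
      refine Prod.ext ?_ (Prod.ext rfl ?_)
      · simp [List.replicate_succ, List.append_assoc]
      · push_cast; ring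
    · have hstep : pvStepA p (fs, x, s) x = (fs ++ ["sideways"], x, s + 1) := by
        simp [pvStepA, hx, hT, hlast]
      rw [hstep, ih _ (s + 1) (by rw [List.getLast?_concat]; simpa using Ne.symm hx)]
      have hk : (min (max 1 p - 1 - s) ((m + 1 : Nat) : Int)).toNat
          = (min (max 1 p - 1 - (s + 1)) ((m : Nat) : Int)).toNat + 1 := by omega
      have hk2 : (m + 1) - (min (max 1 p - 1 - s) ((m + 1 : Nat) : Int)).toNat
          = m - (min (max 1 p - 1 - (s + 1)) ((m : Nat) : Int)).toNat := by omega
      rw [hk]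
      refine Prod.ext ?_ (Prod.ext rfl ?_)
      · simp [List.replicate_succ, List.append_assoc, Nat.succ_sub_succ]
      · push_cast; ring

-- one full maximal run (first element + m repeats), from a valid boundary state
theorem pv_run_eq (p : Int) (y : String) (m : Nat) (fs : List String) (pr : String) (s : Int)
    (h1 : (y == pr) = false ∨ (fs = [] ∧ s = 0))
    (h2 : (fs.getLast?).getD "sideways" = "sideways" ∨ (fs.getLast?).getD "sideways" = pr) :
    List.foldl (pvStepA p) (fs, pr, s) (y :: List.replicate m y)
      = (fs ++ pvSegB y (m + 1) (max 1 p), y, 1 + (m : Int)) := by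
  have hT1 : (1 : Int) ≤ max 1 p := le_max_left 1 p
  -- the first step produces state (fs ++ [out1], y, 1)
  have hfirst : pvStepA p (fs, pr, s) y
      = (fs ++ [if y = "sideways" then "sideways"
                else if (1 : Int) ≥ max 1 p then y else "sideways"], y, 1) := by
    rcases h1 with h1 | ⟨hfs, hs⟩
    · have hpr : ¬ (y = pr) := by simpa using h1
      by_cases hys : y = "sideways"
      · subst hys
        simp [pvStepA, h1]
      · have hpf : (fs.getLast?).getD "sideways" ≠ y := by
          rcases h2 with h2 | h2 <;> rw [h2]
          · exact fun h => hys h.symm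
          · exact fun h => hpr h.symm
        simp [pvStepA, h1, hys, hpf]
    · subst hfs; subst hs
      by_cases hys : y = "sideways"
      · subst hys
        by_cases hpr : ("sideways" : String) = pr
        · simp [pvStepA, ← hpr]
        · simp [pvStepA, hpr]
      · have hsy : ¬ ("sideways" = y) := fun h => hys h.symm
        by_cases hpr : y = pr
        · subst hpr
          simp [pvStepA, hys, hsy]
        · simp [pvStepA, hys, hsy, hpr]
  rw [List.foldl_cons, hfirst]
  by_cases hys : y = "sideways"
  · subst hys
    simp only [if_pos]
    rw [pv_run_sideways]
    refine Prod.ext ?_ (Prod.ext rfl ?_)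
    · rw [pvSegB]; simp [List.replicate_succ, List.append_assoc]
    · push_cast; ring
  · simp only [if_neg hys]
    by_cases hT : (1 : Int) ≥ max 1 p
    · simp only [if_pos hT]
      rw [pv_run_absorbed p y hys m _ _ (by rw [List.getLast?_concat])]
      have hk : (min (max 1 p - 1) ((m + 1 : Nat) : Int)).toNat = 0 := by omega
      refine Prod.ext ?_ (Prod.ext rfl ?_)
      · simp only [pvSegB, beq_iff_eq, if_neg hys]
        rw [hk]
        simp [List.replicate_succ, List.append_assoc]
      · push_cast; ring
    · simp only [if_neg hT]
      rw [pv_run_pending p y hys m _ 1 (by rw [List.getLast?_concat]; simpa using Ne.symm hys)]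
      have hk : (min (max 1 p - 1) ((m + 1 : Nat) : Int)).toNat
          = (min (max 1 p - 1 - 1) ((m : Nat) : Int)).toNat + 1 := by omega
      refine Prod.ext ?_ (Prod.ext rfl ?_)
      · simp only [pvSegB, beq_iff_eq, if_neg hys]
        rw [hk]
        simp [List.replicate_succ, List.append_assoc, Nat.add_sub_add_right]
      · push_cast; ring

theorem pv_dropWhile_head {α : Type} (q : α → Bool) :
    ∀ (l : List α) (z : α) (t : List α), l.dropWhile q = z :: t → q z = false := by
  intro l
  induction l with
  | nil => intro z t h; simp [List.dropWhile] at h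
  | cons a as ih =>
    intro z t h
    rw [List.dropWhile_cons] at h
    by_cases hq : q a = true
    · rw [if_pos hq] at h; exact ih z t h
    · rw [if_neg hq] at h
      injection h with h1 h2
      subst h1
      simpa using hq

theorem pv_main (p : Int) :
    ∀ (n : Nat) (labels fs : List String) (pr : String) (s : Int), labels.length ≤ n →
    (∀ y rest, labels = y :: rest → ((y == pr) = false ∨ (fs = [] ∧ s = 0))) →
    ((fs.getLast?).getD "sideways" = "sideways" ∨ (fs.getLast?).getD "sideways" = pr) →
    (List.foldl (pvStepA p) (fs, pr, s) labels).1 = fs ++ pvGoB (max 1 p) labels := by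
  intro n
  induction n with
  | zero =>
    intro labels fs pr s hlen _ _
    have : labels = [] := List.length_eq_zero_iff.mp (Nat.le_zero.mp hlen)
    subst this; simp [pvGoB]
  | succ N ih =>
    intro labels fs pr s hlen h1 h2
    match labels with
    | [] => simp [pvGoB]
    | y :: rest =>
      have hrun : rest.takeWhile (fun z => z == y)
          = List.replicate (rest.takeWhile (fun z => z == y)).length y := by
        apply List.eq_replicate_of_mem
        intro b hb
        have := List.mem_takeWhile_imp hb
        simpa using this
      set m := (rest.takeWhile (fun z => z == y)).length with hm
      set tail := rest.dropWhile (fun z => z == y) with htail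
      have hsplit : y :: rest = (y :: List.replicate m y) ++ tail := by
        simp only [List.cons_append]
        rw [← hrun, htail, List.takeWhile_append_dropWhile]
      rw [hsplit, List.foldl_append]
      rw [pv_run_eq p y m fs pr s (h1 y rest rfl) h2]
      have hseglen : (pvSegB y (m + 1) (max 1 p)).length = m + 1 := by
        rw [pvSegB]
        split
        · simp
        · simp only [List.length_append, List.length_replicate]
          omega
      have hsegne : pvSegB y (m + 1) (max 1 p) ≠ [] := by
        intro h; rw [h] at hseglen; simp at hseglen
      have hlast' : (((fs ++ pvSegB y (m + 1) (max 1 p)).getLast?).getD "sideways" = "sideways")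
          ∨ (((fs ++ pvSegB y (m + 1) (max 1 p)).getLast?).getD "sideways" = y) := by
        rw [List.getLast?_append_of_ne_nil _ hsegne]
        rcases pv_seg_last y (m + 1) (max 1 p) (by omega) with h | h <;> rw [h] <;> simp
      have htlen : tail.length ≤ N := by
        have ha : tail.length ≤ rest.length := List.length_dropWhile_le _ _
        have hb : rest.length + 1 ≤ N + 1 := by simpa using hlen
        omega
      have h1t : ∀ z t, tail = z :: t →
          ((z == y) = false ∨ (fs ++ pvSegB y (m + 1) (max 1 p) = [] ∧ (1 : Int) + m = 0)) := by
        intro z t hzt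
        exact Or.inl (pv_dropWhile_head _ rest z t (htail ▸ hzt))
      rw [ih tail (fs ++ pvSegB y (m + 1) (max 1 p)) y (1 + m) htlen h1t hlast']
      have htw : tail.takeWhile (fun z => z == y) = [] := by
        cases htt : tail with
        | nil => simp
        | cons z t =>
          have hz : (z == y) = false :=
            pv_dropWhile_head (fun w => w == y) rest z t (htail ▸ htt)
          simp [hz]
      have hdw : tail.dropWhile (fun z => z == y) = tail := by
        cases htt : tail with
        | nil => simp
        | cons z t =>
          have hz : (z == y) = false :=
            pv_dropWhile_head (fun w => w == y) rest z t (htail ▸ htt)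
          simp [hz]
      conv_rhs => rw [pvGoB.eq_def]
      simp [List.append_assoc, htw, hdw]

-- ===== VERDICT (by name: the statement is the Claim_ definition above) =====
theorem apply_regime_persistence_filter_spec : Claim_equal_apply_regime_persistence_filter := by
  intro raw_labels persistence_days _
  unfold Spec_apply_regime_persistence_filter apply_regime_persistence_filter apply_regime_persistence_filter_alt
  rw [pv_main persistence_days raw_labels.length raw_labels [] "" 0 le_rfl
      (fun y rest _ => Or.inr ⟨rfl, rfl⟩) (Or.inl rfl)]
  simp
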